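-- pv_equiv track=rewrite | github.com/pauloeduardodealmeidasantos/projecteuler | 108.py | solve
-- ===== SOURCE A (Python) =====
-- def solve(n):
--     ans = 0
--     y = n + 1
--     while(y <= n * n + n):
--         if ((n * n) % (y - n) == 0):
--             ans += 1
--         y += 1
--     return ans
-- ===== SOURCE B (Python) =====
-- def solve(n):
--     # Counts divisors of n*n by pairing d <-> n*n//d: only scan d with d*d <= n*n,
--     # count each such divisor twice, then correct for the square root counted twice.
--     if n == 0:
--         return 0
--     m = n * n
--     c = 0
--     d = 1
--     while d * d <= m:
--         if m % d == 0:
--             c += 2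
--         d += 1
--     return c - 1
-- ===== Notes on version B (the rewrite author's own statement) =====
-- stated objective: faster
-- what changed: Instead of testing every candidate divisor up to n*n, B scans only candidates d with d*d <= n*n and counts each divisor pair (d, n*n//d) via the small member alone, doubling the count and correcting for the square root counted twice.
import Mathlib
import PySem

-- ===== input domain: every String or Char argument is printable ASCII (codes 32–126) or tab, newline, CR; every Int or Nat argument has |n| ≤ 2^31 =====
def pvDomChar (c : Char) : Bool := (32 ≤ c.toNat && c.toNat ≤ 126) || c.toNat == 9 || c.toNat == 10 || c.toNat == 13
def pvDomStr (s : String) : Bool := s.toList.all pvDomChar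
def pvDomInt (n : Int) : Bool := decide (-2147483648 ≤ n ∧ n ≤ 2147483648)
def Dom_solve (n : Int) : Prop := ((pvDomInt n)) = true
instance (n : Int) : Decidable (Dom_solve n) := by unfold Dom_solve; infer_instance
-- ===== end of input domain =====

-- B scans only d with d*d ≤ n*n instead of every d up to n*n, counting divisor pairs;
-- asymptotically faster, same value everywhere.

-- ===== PORT A =====
-- the while loop of A: y runs from n+1 while y ≤ n*n+n, counting y-n dividing n*n
def solveLoopA (n y ans : Int) : Int :=
  if y ≤ n * n + n then
    solveLoopA n (y + 1) (if PySem.Int.mod (n * n) (y - n) = 0 then ans + 1 else ans)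
  else ans
termination_by (n * n + n + 1 - y).toNat
decreasing_by omega

def solve (n : Int) : Int := solveLoopA n (n + 1) 0

-- ===== PORT B =====
-- the while loop of B: d runs from 1 while d*d ≤ m, adding 2 per divisor
def solveLoopB (m d c : Int) : Int :=
  if h : d * d ≤ m then
    solveLoopB m (d + 1) (if PySem.Int.mod m d = 0 then c + 2 else c)
  else c
termination_by (m + 1 - d).toNat
decreasing_by
  have hdm : d ≤ m := by nlinarith [sq_nonneg d, sq_nonneg (d - 1)]
  omega

def solve_alt (n : Int) : Int :=
  if n = 0 then 0 else solveLoopB (n * n) 1 0 - 1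

-- ===== PRECONDITION & SPEC =====
def Spec_solve (n : Int) (out : Int) : Prop := out = solve_alt n
instance (n : Int) (out : Int) : Decidable (Spec_solve n out) := by unfold Spec_solve; infer_instance

-- ===== CLAIM (what is proved, stated in full; the proofs are below) =====
def Claim_equal_solve : Prop := ∀ (n : Int), Dom_solve n → Spec_solve n (solve n)

-- ===== LEMMAS AND PROOFS =====

lemma icc_insert_left {a b : Int} (h : a ≤ b) :
    Finset.Icc a b = insert a (Finset.Icc (a + 1) b) := by
  ext x; simp only [Finset.mem_Icc, Finset.mem_insert]; omega

-- loop A counts the divisors of n*n lying in [y-n, n*n]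
lemma loopA_eq (n : Int) : ∀ (fuel : Nat) (y ans : Int),
    (n * n + n + 1 - y).toNat ≤ fuel → n + 1 ≤ y →
    solveLoopA n y ans =
      ans + ((Finset.Icc (y - n) (n * n)).filter (fun d => d ∣ n * n)).card := by
  intro fuel
  induction fuel with
  | zero =>
    intro y ans hf hy
    rw [solveLoopA]
    have hgt : n * n + n < y := by omega
    rw [if_neg (by omega)]
    have : Finset.Icc (y - n) (n * n) = ∅ := Finset.Icc_eq_empty (by omega)
    simp [this]
  | succ k ih =>
    intro y ans hf hy
    rw [solveLoopA]
    by_cases hle : y ≤ n * n + n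
    · rw [if_pos hle]
      rw [ih (y + 1) _ (by omega) (by omega)]
      have hpos : 0 < y - n := by omega
      have hmod : (PySem.Int.mod (n * n) (y - n) = 0) ↔ (y - n) ∣ n * n :=
        PySem.Int.mod_eq_zero_iff_dvd _ _
      rw [icc_insert_left (a := y - n) (b := n * n) (by omega)]
      rw [Finset.filter_insert]
      have hy1 : y + 1 - n = y - n + 1 := by ring
      rw [hy1]
      by_cases hdvd : (y - n) ∣ n * n
      · rw [if_pos hdvd, if_pos (hmod.mpr hdvd)]
        rw [Finset.card_insert_of_notMem (by simp [Finset.mem_Icc])]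
        push_cast; ring
      · rw [if_neg hdvd, if_neg (fun h => hdvd (hmod.mp h))]
    · rw [if_neg hle]
      have : Finset.Icc (y - n) (n * n) = ∅ := Finset.Icc_eq_empty (by omega)
      simp [this]

-- loop B counts (twice) the divisors of k*k lying in [d, k], for 1 ≤ d, 1 ≤ k
lemma loopB_eq (k : Int) (hk : 1 ≤ k) : ∀ (fuel : Nat) (d c : Int),
    (k + 1 - d).toNat ≤ fuel → 1 ≤ d →
    solveLoopB (k * k) d c =
      c + 2 * ((Finset.Icc d k).filter (fun e => e ∣ k * k)).card := by
  intro fuel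
  induction fuel with
  | zero =>
    intro d c hf hd
    have hdk : k < d := by omega
    rw [solveLoopB]
    rw [dif_neg (by nlinarith)]
    have : Finset.Icc d k = ∅ := Finset.Icc_eq_empty (by omega)
    simp [this]
  | succ f ih =>
    intro d c hf hd
    rw [solveLoopB]
    by_cases hle : d * d ≤ k * k
    · rw [dif_pos hle]
      have hdk : d ≤ k := by nlinarith
      rw [ih (d + 1) _ (by omega) (by omega)]
      have hmod : (PySem.Int.mod (k * k) d = 0) ↔ d ∣ k * k :=
        PySem.Int.mod_eq_zero_iff_dvd _ _
      rw [icc_insert_left (a := d) (b := k) hdk]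
      rw [Finset.filter_insert]
      by_cases hdvd : d ∣ k * k
      · rw [if_pos hdvd, if_pos (hmod.mpr hdvd)]
        rw [Finset.card_insert_of_notMem (by simp [Finset.mem_Icc])]
        push_cast; ring
      · rw [if_neg hdvd, if_neg (fun h => hdvd (hmod.mp h))]
    · rw [dif_neg hle]
      have hdk : k < d := by nlinarith
      have : Finset.Icc d k = ∅ := Finset.Icc_eq_empty (by omega)
      simp [this]

lemma ediv_ediv_self {m d : Int} (hm : 0 < m) (hd : 0 < d) (hdvd : d ∣ m) :
    m / (m / d) = d := by
  obtain ⟨e, he⟩ := hdvd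
  have hde : m / d = e := by rw [he]; exact Int.mul_ediv_cancel_left e (by omega)
  have hepos : 0 < e := by
    by_contra h
    push Not at h
    have : d * e ≤ 0 := mul_nonpos_of_nonneg_of_nonpos (le_of_lt hd) h
    linarith [he ▸ hm]
  rw [hde, he]
  exact Int.mul_ediv_cancel d (by omega)

-- the divisor-pairing identity: divisors of k*k in (k, k*k] biject with those in [1, k) via d ↦ k*k/d
lemma pairing (k : Int) (hk : 1 ≤ k) :
    ((Finset.Icc (k + 1) (k * k)).filter (fun d => d ∣ k * k)).card =
    (((Finset.Icc 1 k).filter (fun e => e ∣ k * k)).erase k).card := by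
  apply Finset.card_bij' (fun d _ => k * k / d) (fun e _ => k * k / e)
  · intro d hd
    simp only [Finset.mem_filter, Finset.mem_Icc] at hd
    obtain ⟨⟨hd1, hd2⟩, hdvd⟩ := hd
    obtain ⟨e, he⟩ := hdvd
    have hde : k * k / d = e := by rw [he]; exact Int.mul_ediv_cancel_left e (by omega)
    have hkpos : (0:Int) < k * k := by nlinarith
    have hepos : 0 < e := by
      by_contra h
      push Not at h
      have : d * e ≤ 0 := mul_nonpos_of_nonneg_of_nonpos (by omega) h
      linarith [he ▸ hkpos]
    rw [hde]
    simp only [Finset.mem_erase, Finset.mem_filter, Finset.mem_Icc]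
    have hek : e < k := by nlinarith
    exact ⟨by omega, ⟨hepos, by omega⟩, ⟨d, by rw [he]; ring⟩⟩
  · intro e he
    simp only [Finset.mem_erase, Finset.mem_filter, Finset.mem_Icc] at he
    obtain ⟨hne, ⟨he1, he2⟩, hdvd⟩ := he
    obtain ⟨d, hd⟩ := hdvd
    have hed : k * k / e = d := by rw [hd]; exact Int.mul_ediv_cancel_left d (by omega)
    have hkpos : (0:Int) < k * k := by nlinarith
    have hdpos : 0 < d := by
      by_contra h
      push Not at h
      have : e * d ≤ 0 := mul_nonpos_of_nonneg_of_nonpos (by omega) h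
      linarith [hd ▸ hkpos]
    rw [hed]
    simp only [Finset.mem_filter, Finset.mem_Icc]
    have he3 : e ≤ k - 1 := by omega
    have hkd : k < d := by nlinarith
    exact ⟨⟨by omega, by nlinarith⟩, ⟨e, by rw [hd]; ring⟩⟩
  · intro d hd
    simp only [Finset.mem_filter, Finset.mem_Icc] at hd
    exact ediv_ediv_self (by nlinarith) (by omega) hd.2
  · intro e he
    simp only [Finset.mem_erase, Finset.mem_filter, Finset.mem_Icc] at he
    exact ediv_ediv_self (by nlinarith) (by omega) he.2.2

lemma count_split (k : Int) (hk : 1 ≤ k) :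
    (((Finset.Icc 1 (k * k)).filter (fun d => d ∣ k * k)).card : Int) =
    2 * (((Finset.Icc 1 k).filter (fun e => e ∣ k * k)).card : Int) - 1 := by
  have hsplit : Finset.Icc 1 (k * k) = Finset.Icc 1 k ∪ Finset.Icc (k + 1) (k * k) := by
    ext x; simp only [Finset.mem_Icc, Finset.mem_union]; constructor
    · intro hx; omega
    · intro hx; rcases hx with h | h <;> constructor <;> nlinarith [h.1, h.2]
  have hdisj : Disjoint ((Finset.Icc 1 k).filter (fun d => d ∣ k * k))
      ((Finset.Icc (k + 1) (k * k)).filter (fun d => d ∣ k * k)) := by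
    apply Finset.disjoint_filter_filter
    rw [Finset.disjoint_left]
    intro x hx hx'
    simp only [Finset.mem_Icc] at hx hx'
    omega
  rw [hsplit, Finset.filter_union, Finset.card_union_of_disjoint hdisj]
  rw [pairing k hk]
  have hkmem : k ∈ (Finset.Icc 1 k).filter (fun e => e ∣ k * k) := by
    simp only [Finset.mem_filter, Finset.mem_Icc]
    exact ⟨⟨hk, le_refl k⟩, Dvd.intro k rfl⟩
  rw [Finset.card_erase_of_mem hkmem]
  have hpos : 1 ≤ ((Finset.Icc 1 k).filter (fun e => e ∣ k * k)).card :=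
    Finset.card_pos.mpr ⟨k, hkmem⟩
  push_cast [Int.ofNat_sub hpos]
  ring

-- ===== VERDICT (by name: the statement is the Claim_ definition above) =====
theorem solve_spec : Claim_equal_solve := by
  intro n _
  unfold Spec_solve solve solve_alt
  by_cases hn : n = 0
  · subst hn
    rw [solveLoopA]
    norm_num
  · rw [if_neg hn]
    set k : Int := |n| with hkdef
    have hk : 1 ≤ k := by
      rcases lt_or_gt_of_ne hn with h | h
      · rw [hkdef, abs_of_neg h]; omega
      · rw [hkdef, abs_of_pos h]; omega
    have hkk : n * n = k * k := by rw [hkdef, abs_mul_abs_self]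
    have hA := loopA_eq n (n * n + n + 1 - (n + 1)).toNat (n + 1) 0 le_rfl le_rfl
    have hB := loopB_eq k hk (k + 1 - 1).toNat 1 0 le_rfl le_rfl
    have h1 : n + 1 - n = 1 := by ring
    rw [h1, hkk] at hA
    rw [hkk, hA, hB, count_split k hk]
    ring
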